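-- pv_equiv track=rewrite | github.com/adam-tabaczynski/automate-boring-stuff-scripts | chapter_05/isValidChessBoard.py | CheckFieldsValidity
-- ===== SOURCE A (Python) =====
-- def CheckFieldsValidity(chessboard):
--     charList = ['a', 'b', 'c', 'd', 'e', 'f', 'g', 'h']
--     for i in range(8):
--         for currentChar in charList:
--             field = str(i + 1) + currentChar
--             if field not in chessboard.keys():
--                 return "Field differs from 1a - 8h system."
--     return "All fields are good."
-- ===== SOURCE B (Python) =====
-- def CheckFieldsValidity(chessboard):
--     seen = set()
--     for k in chessboard.keys():
--         if len(k) == 2 and '1' <= k[0] <= '8' and 'a' <= k[1] <= 'h':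
--             seen.add(k)
--     if len(seen) == 64:
--         return "All fields are good."
--     return "Field differs from 1a - 8h system."
-- ===== Notes on version B (the rewrite author's own statement) =====
-- stated objective: alternative
-- what changed: Inverts the direction of the check: instead of generating the 64 required field names and testing each for membership in the dict, B makes a single pass over the dict's keys, collects the distinct keys whose shape matches a valid field name (digit 1-8 followed by letter a-h), and compares that count with 64.
import Mathlib
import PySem

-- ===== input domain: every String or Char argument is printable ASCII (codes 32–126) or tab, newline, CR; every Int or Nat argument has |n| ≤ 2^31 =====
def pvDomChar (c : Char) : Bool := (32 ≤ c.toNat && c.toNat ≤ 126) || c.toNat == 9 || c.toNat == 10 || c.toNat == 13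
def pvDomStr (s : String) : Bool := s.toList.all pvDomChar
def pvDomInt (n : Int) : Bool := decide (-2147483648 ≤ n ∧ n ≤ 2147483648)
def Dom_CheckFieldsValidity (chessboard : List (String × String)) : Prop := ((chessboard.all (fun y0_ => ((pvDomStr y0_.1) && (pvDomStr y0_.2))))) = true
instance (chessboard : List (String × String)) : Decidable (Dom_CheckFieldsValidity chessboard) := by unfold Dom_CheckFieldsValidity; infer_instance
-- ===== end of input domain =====

-- B inverts the check: instead of generating the 64 required names and testing each for
-- membership, it scans the dict's keys once, collects the distinct keys shaped like a valid
-- field name (digit 1-8 then letter a-h), and compares that count with 64 (alternative decomposition, same cost).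

-- ===== PORT A =====
-- nested 'for' with early return, as findSome? over the same ranges
def CheckFieldsValidity (chessboard : List (String × String)) : String :=
  let charList : List String := ["a", "b", "c", "d", "e", "f", "g", "h"]
  match (PySem.List.pyRange 0 8 1).findSome? (fun i =>
    charList.findSome? (fun currentChar =>
      let field := PySem.Int.toStr (i + 1) ++ currentChar
      if (chessboard.map Prod.fst).contains field then none
      else some "Field differs from 1a - 8h system.")) with
  | some s => s
  | none => "All fields are good."

-- ===== PORT B =====
-- len(k) == 2 and '1' <= k[0] <= '8' and 'a' <= k[1] <= 'h' (short-circuit guard + indexing,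
-- ported as a match on the two-character shape; single-char string comparison = char comparison)
def pvValidField (k : String) : Bool :=
  match k.toList with
  | [c0, c1] => decide ('1' ≤ c0 ∧ c0 ≤ '8') && decide ('a' ≤ c1 ∧ c1 ≤ 'h')
  | _ => false

def CheckFieldsValidity_alt (chessboard : List (String × String)) : String :=
  let seen : PySem.Set String :=
    (chessboard.map Prod.fst).foldl
      (fun s k => if pvValidField k then PySem.Set.add s k else s) PySem.Set.empty
  if PySem.Set.len seen == 64 then "All fields are good."
  else "Field differs from 1a - 8h system."

-- ===== PRECONDITION & SPEC =====
def Spec_CheckFieldsValidity (chessboard : List (String × String)) (out : String) : Prop := out = CheckFieldsValidity_alt chessboard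
instance (chessboard : List (String × String)) (out : String) : Decidable (Spec_CheckFieldsValidity chessboard out) := by unfold Spec_CheckFieldsValidity; infer_instance

-- ===== CLAIM (what is proved, stated in full; the proofs are below) =====
def Claim_equal_CheckFieldsValidity : Prop := ∀ (chessboard : List (String × String)), Dom_CheckFieldsValidity chessboard → Spec_CheckFieldsValidity chessboard (CheckFieldsValidity chessboard)

-- ===== LEMMAS AND PROOFS =====

def pvFields : List String :=
  ["1a","1b","1c","1d","1e","1f","1g","1h",
   "2a","2b","2c","2d","2e","2f","2g","2h",
   "3a","3b","3c","3d","3e","3f","3g","3h",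
   "4a","4b","4c","4d","4e","4f","4g","4h",
   "5a","5b","5c","5d","5e","5f","5g","5h",
   "6a","6b","6c","6d","6e","6f","6g","6h",
   "7a","7b","7c","7d","7e","7f","7g","7h",
   "8a","8b","8c","8d","8e","8f","8g","8h"]

-- early-return scan over a field list vs. a bulk "all present" test, for any key list
theorem pv_scan_eq_all (keys : List String) (fields : List String) :
    (match fields.findSome? (fun f =>
        if keys.contains f then none
        else some "Field differs from 1a - 8h system.") with
     | some s => s
     | none => "All fields are good.")
    = (if fields.all (fun f => keys.contains f) then "All fields are good."
       else "Field differs from 1a - 8h system.") := by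
  induction fields with
  | nil => rfl
  | cons f rest ih =>
    rw [List.findSome?_cons]
    by_cases h : keys.contains f = true
    · rw [if_pos h]
      simpa only [List.all_cons, h, Bool.true_and] using ih
    · rw [if_neg h, List.all_cons]
      rw [Bool.not_eq_true] at h
      rw [h, Bool.false_and]
      rfl

-- the nested early-return loop scans exactly the flattened field list
theorem pv_nested_eq_flat (P : String → Option String) (outer : List Int) (inner : List String) :
    outer.findSome? (fun i => inner.findSome? (fun c => P (PySem.Int.toStr (i + 1) ++ c)))
    = (outer.flatMap (fun i => inner.map (fun c => PySem.Int.toStr (i + 1) ++ c))).findSome? P := by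
  induction outer with
  | nil => rfl
  | cons a l ih =>
    rw [List.flatMap_cons, List.findSome?_append, List.findSome?_cons, List.findSome?_map, ih]
    cases h : inner.findSome? (fun c => P (PySem.Int.toStr (a + 1) ++ c)) <;>
      simp [Function.comp_def, h, Option.or]

-- A equals "all 64 fields present"
theorem pv_A_eq (chessboard : List (String × String)) :
    CheckFieldsValidity chessboard
    = (if pvFields.all (fun f => (chessboard.map Prod.fst).contains f)
       then "All fields are good." else "Field differs from 1a - 8h system.") := by
  unfold CheckFieldsValidity
  show (match (PySem.List.pyRange 0 8 1).findSome? (fun i =>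
      (["a","b","c","d","e","f","g","h"] : List String).findSome? (fun currentChar =>
        if (List.map Prod.fst chessboard).contains (PySem.Int.toStr (i + 1) ++ currentChar) = true then none
        else some "Field differs from 1a - 8h system.")) with
    | some s => s
    | none => "All fields are good.")
    = _
  rw [show PySem.List.pyRange 0 8 1 = ([0,1,2,3,4,5,6,7] : List Int) from by decide]
  rw [pv_nested_eq_flat (P := fun field =>
    if (List.map Prod.fst chessboard).contains field = true then none
    else some "Field differs from 1a - 8h system.")]
  rw [show (([0,1,2,3,4,5,6,7] : List Int).flatMap (fun i =>
        (["a","b","c","d","e","f","g","h"] : List String).map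
          (fun c => PySem.Int.toStr (i + 1) ++ c))) = pvFields from by decide]
  exact pv_scan_eq_all (chessboard.map Prod.fst) pvFields

-- a string is a valid field name iff it is one of the 64 field names
theorem pv_valid_iff (f : String) : pvValidField f = true ↔ f ∈ pvFields := by
  constructor
  · intro h
    unfold pvValidField at h
    obtain ⟨cs, rfl⟩ : ∃ cs, f = String.ofList cs := ⟨f.toList, String.ofList_toList.symm⟩
    rw [String.toList_ofList] at h
    match cs with
    | [] => simp at h
    | [_] => simp at h
    | _ :: _ :: _ :: _ => simp at h
    | [c0, c1] =>
      simp only [Bool.and_eq_true, decide_eq_true_eq] at h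
      obtain ⟨⟨h1, h2⟩, h3, h4⟩ := h
      have e0 : c0 = Char.ofNat c0.toNat := (Char.ofNat_toNat c0).symm
      have e1 : c1 = Char.ofNat c1.toNat := (Char.ofNat_toNat c1).symm
      obtain ⟨n0, hn0⟩ : ∃ n, c0.toNat = n := ⟨_, rfl⟩
      obtain ⟨n1, hn1⟩ : ∃ n, c1.toNat = n := ⟨_, rfl⟩
      have hv0a : 49 ≤ n0 := hn0 ▸ h1
      have hv0b : n0 ≤ 56 := hn0 ▸ h2
      have hv1a : 97 ≤ n1 := hn1 ▸ h3
      have hv1b : n1 ≤ 104 := hn1 ▸ h4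
      rw [hn0] at e0
      rw [hn1] at e1
      subst e0 e1
      interval_cases n0 <;> interval_cases n1 <;> decide
  · intro h
    fin_cases h <;> decide

-- the filtering fold builds set(filter(valid, keys))
theorem pv_fold_eq_ofList_filter (p : String → Bool) (keys : List String) (s : PySem.Set String) :
    keys.foldl (fun s k => if p k then PySem.Set.add s k else s) s
    = (keys.filter p).foldl PySem.Set.add s := by
  induction keys generalizing s with
  | nil => rfl
  | cons k rest ih =>
    by_cases h : p k = true <;> simp [h, List.foldl_cons, ih]

-- counting: a nodup sublist of the 64 field names has length 64 iff it contains them all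
theorem pv_count_iff (S : List String) (hnd : S.Nodup) (hsub : ∀ x ∈ S, x ∈ pvFields) :
    S.length = 64 ↔ ∀ f ∈ pvFields, f ∈ S := by
  have hF : pvFields.Nodup := by decide
  have hsp : List.Subperm S pvFields := hnd.subperm hsub
  constructor
  · intro hlen f hf
    have hperm : List.Perm S pvFields := hsp.perm_of_length_le (by rw [hlen]; decide)
    exact hperm.mem_iff.mpr hf
  · intro hall
    have hsp2 : List.Subperm pvFields S := hF.subperm hall
    have l1 := hsp.length_le
    have l2 := hsp2.length_le
    have hFl : pvFields.length = 64 := by decide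
    omega

theorem pv_B_eq (chessboard : List (String × String)) :
    CheckFieldsValidity_alt chessboard
    = (if pvFields.all (fun f => (chessboard.map Prod.fst).contains f)
       then "All fields are good." else "Field differs from 1a - 8h system.") := by
  unfold CheckFieldsValidity_alt
  rw [pv_fold_eq_ofList_filter]
  set keys := chessboard.map Prod.fst with hk
  have hofl : (keys.filter pvValidField).foldl PySem.Set.add PySem.Set.empty
      = PySem.Set.ofList (keys.filter pvValidField) := (PySem.Set.ofList_eq_foldl _).symm
  rw [hofl]
  set S := PySem.Set.ofList (keys.filter pvValidField) with hS
  have hnd : S.Nodup := PySem.Set.nodup_ofList _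
  have hmem : ∀ x, x ∈ S ↔ (x ∈ keys ∧ pvValidField x = true) := by
    intro x
    rw [hS, PySem.Set.mem_ofList, List.mem_filter]
  have hsub : ∀ x ∈ S, x ∈ pvFields := by
    intro x hx
    exact (pv_valid_iff x).mp ((hmem x).mp hx).2
  have hcnt := pv_count_iff S hnd hsub
  have hlen : PySem.Set.len S = (S.length : Int) := rfl
  have hbeq : (PySem.Set.len S == (64 : Int)) = true ↔ S.length = 64 := by
    rw [hlen, beq_iff_eq]
    exact ⟨fun h => by exact_mod_cast h, fun h => by exact_mod_cast h⟩
  have hcond : (PySem.Set.len S == (64 : Int)) = pvFields.all (fun f => keys.contains f) := by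
    rw [Bool.eq_iff_iff, hbeq, List.all_eq_true, hcnt]
    constructor
    · intro h f hf
      have := ((hmem f).mp (h f hf)).1
      simpa using this
    · intro h f hf
      rw [hmem]
      exact ⟨by simpa using h f hf, (pv_valid_iff f).mpr hf⟩
  change (if (PySem.Set.len S == (64 : Int)) = true then "All fields are good."
      else "Field differs from 1a - 8h system.") = _
  rw [hcond]

-- ===== VERDICT (by name: the statement is the Claim_ definition above) =====
theorem CheckFieldsValidity_spec : Claim_equal_CheckFieldsValidity := by
  intro chessboard _
  unfold Spec_CheckFieldsValidity
  rw [pv_A_eq, pv_B_eq]
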